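-- pv_equiv track=rewrite | github.com/seguinanto10/aoc2k22 | day5/day5.py | rearrange_lines
-- ===== SOURCE A (Python) =====
-- def rearrange_lines(lines):
--     boxes = []
--     movements = []
--     before = True
--     for line in lines:
--         before = (line != '\n')
--         line = line.replace('\n', '')
--         if before and movements == []:
--             boxes.append(line)
--         else:
--             movements.append(line)
--     movements = movements[1::]
--
--     return boxes, movements
-- ===== SOURCE B (Python) =====
-- def rearrange_lines(lines):
--     lines = list(lines)
--     try:
--         i = lines.index('\n')
--     except ValueError:
--         i = len(lines)
--     boxes = [l.replace('\n', '') for l in lines[:i]]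
--     movements = [l.replace('\n', '') for l in lines[i + 1:]]
--     return boxes, movements
-- ===== Notes on version B (the rewrite author's own statement) =====
-- stated objective: simpler
-- what changed: Replaces A's stateful flag-driven single pass (with a dummy first movement dropped afterwards) by locating the first '\n' separator line and partitioning the list around it with two slices.
import Mathlib
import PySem

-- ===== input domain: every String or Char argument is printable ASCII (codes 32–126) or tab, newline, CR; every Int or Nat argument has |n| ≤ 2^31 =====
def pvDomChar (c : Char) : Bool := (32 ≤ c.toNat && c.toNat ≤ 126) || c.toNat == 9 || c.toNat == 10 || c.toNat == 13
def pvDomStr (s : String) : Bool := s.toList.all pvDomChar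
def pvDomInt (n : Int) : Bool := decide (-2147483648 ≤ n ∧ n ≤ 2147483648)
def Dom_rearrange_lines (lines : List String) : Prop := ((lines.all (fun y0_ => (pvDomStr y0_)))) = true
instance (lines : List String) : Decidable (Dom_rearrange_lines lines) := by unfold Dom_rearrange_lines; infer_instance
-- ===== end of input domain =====

-- B replaces A's stateful flag-driven single pass by finding the first "\n" separator
-- line and partitioning around it with two slices (objective: simpler).

-- ===== PORT A =====
-- one loop step of A: state is (boxes, movements); 'before' is recomputed each iteration
def pvStepA (st : List String × List String) (line : String) : List String × List String :=
  let before := line ≠ "\n"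
  let line' := PySem.Str.replace line "\n" ""
  if before ∧ st.2 = [] then (st.1 ++ [line'], st.2) else (st.1, st.2 ++ [line'])

def rearrange_lines (lines : List String) : List String × List String :=
  let st := lines.foldl pvStepA ([], [])
  (st.1, PySem.List.slice st.2 (some 1) none)   -- movements[1::]

-- ===== PORT B =====
def rearrange_lines_alt (lines : List String) : List String × List String :=
  let i : Int := match PySem.List.index? lines "\n" with
    | some k => (k : Int)
    | none => (lines.length : Int)
  ((PySem.List.slice lines none (some i)).map (fun l => PySem.Str.replace l "\n" ""),
   (PySem.List.slice lines (some (i + 1)) none).map (fun l => PySem.Str.replace l "\n" ""))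

-- ===== PRECONDITION & SPEC =====
def Spec_rearrange_lines (lines : List String) (out : List String × List String) : Prop := out = rearrange_lines_alt lines
instance (lines : List String) (out : List String × List String) : Decidable (Spec_rearrange_lines lines out) := by unfold Spec_rearrange_lines; infer_instance

-- ===== CLAIM (what is proved, stated in full; the proofs are below) =====
def Claim_equal_rearrange_lines : Prop := ∀ (lines : List String), Dom_rearrange_lines lines → Spec_rearrange_lines lines (rearrange_lines lines)

-- ===== LEMMAS AND PROOFS =====

-- once movements is nonempty, every later line goes to movements unchanged (after replace)
theorem pv_fold_nonempty (rest : List String) (b m : List String) (hm : m ≠ []) :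
    rest.foldl pvStepA (b, m) = (b, m ++ rest.map (fun l => PySem.Str.replace l "\n" "")) := by
  induction rest generalizing m with
  | nil => simp
  | cons l t ih =>
      simp only [List.foldl_cons, List.map_cons, pvStepA]
      rw [if_neg (by simp [hm])]
      rw [ih (m ++ [PySem.Str.replace l "\n" ""]) (by simp)]
      simp

-- while movements is empty, boxes accumulates on the left independently
theorem pv_fold_shift (rest : List String) (b : List String) :
    rest.foldl pvStepA (b, []) =
      (b ++ (rest.foldl pvStepA ([], [])).1, (rest.foldl pvStepA ([], [])).2) := by
  induction rest generalizing b with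
  | nil => simp
  | cons l t ih =>
      simp only [List.foldl_cons, pvStepA]
      simp only [List.nil_append]
      by_cases hl : l = "\n"
      · rw [if_neg (by simp [hl]), if_neg (by simp [hl])]
        rw [pv_fold_nonempty t b [PySem.Str.replace l "\n" ""] (by simp),
            pv_fold_nonempty t [] [PySem.Str.replace l "\n" ""] (by simp)]
        simp
      · rw [if_pos (by simp [hl]), if_pos (by simp [hl])]
        rw [ih (b ++ [PySem.Str.replace l "\n" ""]), ih [PySem.Str.replace l "\n" ""]]
        simp

theorem pv_repl_sep : PySem.Str.replace "\n" "\n" "" = "" := by decide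

-- characterisation of A's fold in terms of the first occurrence of "\n"
theorem pv_fold_char (lines : List String) :
    lines.foldl pvStepA ([], []) =
      match PySem.List.index? lines "\n" with
      | none => (lines.map (fun l => PySem.Str.replace l "\n" ""), [])
      | some k => ((lines.take k).map (fun l => PySem.Str.replace l "\n" ""),
                   "" :: (lines.drop (k + 1)).map (fun l => PySem.Str.replace l "\n" "")) := by
  induction lines with
  | nil => simp [PySem.List.index?]
  | cons l t ih =>
      by_cases hl : l = "\n"
      · subst hl
        rw [PySem.List.index?_cons_self]
        simp only [List.foldl_cons, pvStepA]
        rw [if_neg (by simp)]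
        simp only [List.nil_append, pv_repl_sep]
        rw [pv_fold_nonempty t [] [""] (by simp)]
        simp
      · rw [PySem.List.index?_cons_of_ne t hl]
        simp only [List.foldl_cons, pvStepA]
        rw [if_pos (by simp [hl])]
        simp only [List.nil_append]
        rw [pv_fold_shift t [PySem.Str.replace l "\n" ""], ih]
        cases h : PySem.List.index? t "\n" with
        | none => simp
        | some k => simp

theorem pv_main (lines : List String) : rearrange_lines lines = rearrange_lines_alt lines := by
  unfold rearrange_lines rearrange_lines_alt
  rw [pv_fold_char]
  cases h : PySem.List.index? lines "\n" with
  | none =>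
      dsimp only
      have h1 : ((lines.length : Int) + 1) = ((lines.length + 1 : Nat) : Int) := by push_cast; ring
      rw [h1, PySem.List.slice_to_natCast, PySem.List.slice_from_natCast]
      simp [PySem.List.slice_from_one]
  | some k =>
      dsimp only
      have h1 : ((k : Int) + 1) = ((k + 1 : Nat) : Int) := by push_cast; ring
      rw [PySem.List.slice_to_natCast, h1, PySem.List.slice_from_natCast]
      simp [PySem.List.slice_from_one]

-- ===== VERDICT (by name: the statement is the Claim_ definition above) =====
theorem rearrange_lines_spec : Claim_equal_rearrange_lines := by
  intro lines _
  unfold Spec_rearrange_lines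
  exact pv_main lines
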